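-- pv_equiv track=rewrite | github.com/JangKyumin/Algorithm | 프로그래머스/lv0/120853. 컨트롤 제트/컨트롤 제트.py | solution
-- ===== SOURCE A (Python) =====
-- def solution(s):
--     answer = 0
--     s_l = s.split(' ')
--     for i in range(len(s_l)):
--         if s_l[i] != "Z":
--             if (i + 1) < len(s_l) and s_l[i + 1] != "Z" or i == (len(s_l) - 1):
--                 answer += int(s_l[i])
--     return answer
-- ===== SOURCE B (Python) =====
-- def solution(s):
--     answer = 0
--     cancel = False
--     for tok in reversed(s.split(' ')):
--         if tok == "Z":
--             cancel = True
--         elif cancel: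
--             cancel = False
--         else:
--             answer += int(tok)
--     return answer
-- ===== Notes on version B (the rewrite author's own statement) =====
-- stated objective: alternative
-- what changed: Replaces A's forward index loop over range(len) with s_l[i+1] lookahead by a single reverse scan over the token list carrying a cancel-next-number boolean flag, with no indexing at all.
import Mathlib
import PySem

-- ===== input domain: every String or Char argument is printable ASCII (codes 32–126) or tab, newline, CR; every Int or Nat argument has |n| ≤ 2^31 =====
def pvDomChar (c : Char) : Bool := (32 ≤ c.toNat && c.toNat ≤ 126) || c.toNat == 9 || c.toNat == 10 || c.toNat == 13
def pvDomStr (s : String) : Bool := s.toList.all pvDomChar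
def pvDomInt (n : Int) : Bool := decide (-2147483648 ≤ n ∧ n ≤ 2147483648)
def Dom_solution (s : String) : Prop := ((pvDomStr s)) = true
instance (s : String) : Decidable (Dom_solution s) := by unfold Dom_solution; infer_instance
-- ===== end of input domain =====

-- B replaces A's forward index loop with one-token lookahead by a reverse scan over the
-- tokens carrying a cancel-next-number flag (objective: alternative decomposition, no indexing).

-- ===== PORT A =====
-- literal port of A: split on ' ', loop i over range(len), lookahead at i+1;
-- int(tok) is PySem.Int.ofStr?; its `none` case (Python ValueError) is excluded by Pre_solution.
def solution (s : String) : Int :=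
  let s_l : List String := (PySem.Str.split? s " ").getD []   -- sep " " ≠ "", split? is always `some`
  (PySem.List.pyRange 0 (s_l.length : Int) 1).foldl (fun answer i =>
    if PySem.List.pyGetD s_l i "" ≠ "Z" then
      if ((i + 1) < (s_l.length : Int) ∧ PySem.List.pyGetD s_l (i + 1) "" ≠ "Z")
          ∨ i = (s_l.length : Int) - 1 then
        answer + (PySem.Int.ofStr? (PySem.List.pyGetD s_l i "")).getD 0
      else answer
    else answer) 0

-- ===== PORT B =====
-- literal port of B: reverse scan, state = (answer, cancel-next-number flag)
def solution_alt (s : String) : Int :=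
  (((PySem.Str.split? s " ").getD []).reverse.foldl (fun st tok =>
    if tok = "Z" then (st.1, true)
    else if st.2 then (st.1, false)
    else (st.1 + (PySem.Int.ofStr? tok).getD 0, st.2)) ((0 : Int), false)).1

-- ===== PRECONDITION & SPEC =====
-- Pre_ excludes exactly the inputs where Python A raises ValueError: some token that the
-- rule requires to be summed (≠ "Z" and not immediately followed by "Z") does not parse as an int.
def Pre_solution (s : String) : Prop :=
  ∀ i : Nat, ∀ h : i < ((PySem.Str.split? s " ").getD []).length,
    ((PySem.Str.split? s " ").getD [])[i] ≠ "Z" →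
    (∀ h2 : i + 1 < ((PySem.Str.split? s " ").getD []).length,
        ((PySem.Str.split? s " ").getD [])[i + 1] ≠ "Z") →
    (PySem.Int.ofStr? ((PySem.Str.split? s " ").getD [])[i]).isSome = true
instance (s : String) : Decidable (Pre_solution s) := by unfold Pre_solution; infer_instance

def pvWitness_solution : String := "1 Z Z 2"

def Spec_solution (s : String) (out : Int) : Prop := out = solution_alt s
instance (s : String) (out : Int) : Decidable (Spec_solution s out) := by unfold Spec_solution; infer_instance

-- ===== CLAIM (what is proved, stated in full; the proofs are below) =====
def Claim_equal_solution : Prop := ∀ (s : String), Dom_solution s → Pre_solution s → Spec_solution s (solution s)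

-- ===== LEMMAS AND PROOFS =====

-- value of a summed token
def vtok (t : String) : Int := (PySem.Int.ofStr? t).getD 0

-- common specification: add each token that is not "Z" and not immediately followed by "Z"
def fA : List String → Int
  | [] => 0
  | t :: r => (if t ≠ "Z" ∧ r.head? ≠ some "Z" then vtok t else 0) + fA r

-- B's loop body
def stepB (st : Int × Bool) (tok : String) : Int × Bool :=
  if tok = "Z" then (st.1, true)
  else if st.2 then (st.1, false)
  else (st.1 + vtok tok, st.2)

lemma stepB_snd (st : Int × Bool) (tok : String) :
    (stepB st tok).2 = decide (tok = "Z") := by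
  unfold stepB; split_ifs with h1 h2 <;> simp_all

lemma foldr_stepB_snd (l : List String) :
    (l.foldr (fun tok st => stepB st tok) ((0 : Int), false)).2
      = decide (l.head? = some "Z") := by
  cases l with
  | nil => simp
  | cons t r => simp [stepB_snd]

lemma stepB_eqZ (st : Int × Bool) (t : String) (h : t = "Z") :
    stepB st t = (st.1, true) := by
  cases st; simp [stepB, h]

lemma stepB_ne_true (st : Int × Bool) (t : String) (hZ : t ≠ "Z") (h : st.2 = true) :
    stepB st t = (st.1, false) := by
  cases st; simp_all [stepB]

lemma stepB_ne_false (st : Int × Bool) (t : String) (hZ : t ≠ "Z") (h : st.2 = false) :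
    stepB st t = (st.1 + vtok t, false) := by
  cases st; simp_all [stepB]

lemma foldr_stepB_fst (l : List String) :
    (l.foldr (fun tok st => stepB st tok) ((0 : Int), false)).1 = fA l := by
  induction l with
  | nil => simp [fA]
  | cons t r ih =>
    rw [List.foldr_cons]
    have h2 := foldr_stepB_snd r
    by_cases hZ : t = "Z"
    · rw [stepB_eqZ _ _ hZ]; simp [fA, hZ, ih]
    · by_cases hh : r.head? = some "Z"
      · have hsnd : (r.foldr (fun tok st => stepB st tok) ((0 : Int), false)).2 = true := by
          rw [h2]; simp [hh]
        rw [stepB_ne_true _ _ hZ hsnd]; simp [fA, hZ, hh, ih]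
      · have hsnd : (r.foldr (fun tok st => stepB st tok) ((0 : Int), false)).2 = false := by
          rw [h2]; simp [hh]
        rw [stepB_ne_false _ _ hZ hsnd]; simp [fA, hZ, hh, ih]; ring

-- A's loop body, after the range has been rewritten to natural-number indices
lemma solution_body_nat (l : List String) (i : Nat) (hi : i < l.length) (acc : Int) :
    (if PySem.List.pyGetD l (i : Int) "" ≠ "Z" then
      if (((i : Int) + 1) < (l.length : Int) ∧ PySem.List.pyGetD l ((i : Int) + 1) "" ≠ "Z")
          ∨ (i : Int) = (l.length : Int) - 1 then
        acc + (PySem.Int.ofStr? (PySem.List.pyGetD l (i : Int) "")).getD 0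
      else acc
     else acc)
    = acc + (if l.getD i "" ≠ "Z" ∧ (l.drop (i + 1)).head? ≠ some "Z" then vtok (l.getD i "") else 0) := by
  have hcast : ((i : Int) + 1) = ((i + 1 : Nat) : Int) := by push_cast; ring
  rw [hcast, PySem.List.pyGetD_natCast, PySem.List.pyGetD_natCast]
  by_cases hnext : i + 1 < l.length
  · have hne : (i : Int) ≠ (l.length : Int) - 1 := by omega
    have hlt : ((i + 1 : Nat) : Int) < (l.length : Int) := by exact_mod_cast hnext
    have hdrop : (l.drop (i + 1)).head? = some (l.getD (i + 1) "") := by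
      rw [List.getD_eq_getElem?_getD, List.head?_drop]
      simp [List.getElem?_eq_getElem hnext]
    by_cases hz : l.getD i "" = "Z"
    · simp_all
    · by_cases hz2 : l.getD (i + 1) "" = "Z"
      · simp_all
      · simp_all [vtok]
  · have heq : (i : Int) = (l.length : Int) - 1 := by omega
    have hdrop : (l.drop (i + 1)).head? = none := by
      simp; omega
    have hnlt : ¬ ((i + 1 : Nat) : Int) < (l.length : Int) := by exact_mod_cast hnext
    by_cases hz : l.getD i "" = "Z"
    · simp_all
    · simp_all [vtok]

lemma sum_fA (l : List String) :
    ((List.range l.length).map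
        (fun i => if l.getD i "" ≠ "Z" ∧ (l.drop (i + 1)).head? ≠ some "Z" then vtok (l.getD i "") else 0)).sum
      = fA l := by
  induction l with
  | nil => simp [fA]
  | cons t r ih =>
    rw [List.length_cons, List.range_succ_eq_map, List.map_cons, List.map_map, List.sum_cons]
    have h0 : (if (t :: r).getD 0 "" ≠ "Z" ∧ ((t :: r).drop 1).head? ≠ some "Z" then vtok ((t :: r).getD 0 "") else 0)
        = (if t ≠ "Z" ∧ r.head? ≠ some "Z" then vtok t else 0) := by
      simp
    have hshift : ∀ i : Nat,
        ((fun i => if (t :: r).getD i "" ≠ "Z" ∧ ((t :: r).drop (i + 1)).head? ≠ some "Z" then vtok ((t :: r).getD i "") else 0) ∘ Nat.succ) i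
          = (fun i => if r.getD i "" ≠ "Z" ∧ (r.drop (i + 1)).head? ≠ some "Z" then vtok (r.getD i "") else 0) i := by
      intro i; simp
    rw [h0, List.map_congr_left (fun i _ => hshift i), ih, fA]

lemma solution_eq_fA (l : List String) :
    (PySem.List.pyRange 0 (l.length : Int) 1).foldl (fun answer i =>
      if PySem.List.pyGetD l i "" ≠ "Z" then
        if ((i + 1) < (l.length : Int) ∧ PySem.List.pyGetD l (i + 1) "" ≠ "Z")
            ∨ i = (l.length : Int) - 1 then
          answer + (PySem.Int.ofStr? (PySem.List.pyGetD l i "")).getD 0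
        else answer
      else answer) 0 = fA l := by
  rw [PySem.List.pyRange_zero_natCast]
  rw [List.foldl_map]
  have hcg := PySem.List.foldl_congr_mem (List.range l.length)
    (fun acc (i : Nat) =>
      if PySem.List.pyGetD l (i : Int) "" ≠ "Z" then
        if (((i : Int) + 1) < (l.length : Int) ∧ PySem.List.pyGetD l ((i : Int) + 1) "" ≠ "Z")
            ∨ (i : Int) = (l.length : Int) - 1 then
          acc + (PySem.Int.ofStr? (PySem.List.pyGetD l (i : Int) "")).getD 0
        else acc
      else acc)
    (fun acc (i : Nat) =>
      acc + (if l.getD i "" ≠ "Z" ∧ (l.drop (i + 1)).head? ≠ some "Z" then vtok (l.getD i "") else 0))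
    0
    (by intro acc i hi; exact solution_body_nat l i (List.mem_range.mp hi) acc)
  rw [hcg, PySem.List.foldl_add, zero_add, sum_fA]

lemma alt_eq_fA (l : List String) :
    (l.reverse.foldl (fun st tok =>
      if tok = "Z" then (st.1, true)
      else if st.2 then (st.1, false)
      else (st.1 + (PySem.Int.ofStr? tok).getD 0, st.2)) ((0 : Int), false)).1 = fA l := by
  have hstep : (fun (st : Int × Bool) tok =>
      if tok = "Z" then (st.1, true)
      else if st.2 then (st.1, false)
      else (st.1 + (PySem.Int.ofStr? tok).getD 0, st.2)) = stepB := by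
    funext st tok; simp [stepB, vtok]
  rw [hstep, List.foldl_reverse, foldr_stepB_fst]

-- ===== VERDICT (by name: the statement is the Claim_ definition above) =====
theorem solution_spec : Claim_equal_solution := by
  intro s _ _
  unfold Spec_solution solution solution_alt
  rw [solution_eq_fA, alt_eq_fA]
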